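-- pv_equiv track=rewrite | github.com/cc-archive/pootle | filters/decoration.py | findaccelerators
-- ===== SOURCE A (Python) =====
-- def isvalidaccelerator(accelerator, ignorelist=[]):
--   """returns whether the given accelerator string is a valid one..."""
--   if len(accelerator) == 0 or accelerator in ignorelist:
--     return 0
--   accelerator = accelerator.replace("_","")
--   return accelerator.isalnum()
--
-- def findaccelerators(str1, accelmarker, ignorelist=[]):
--   """returns all the accelerators and locations in str1 marked with a given marker"""
--   accelerators = []
--   currentpos = 0
--   while currentpos >= 0:
--     currentpos = str1.find(accelmarker, currentpos)
--     if currentpos >= 0: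
--       accelstart = currentpos
--       currentpos += len(accelmarker)
--       # we assume accelerators are single characters
--       accelend = currentpos + 1
--       if accelend > len(str1): break
--       accelerator = str1[currentpos:accelend]
--       currentpos = accelend
--       if isvalidaccelerator(accelerator, ignorelist):
--         accelerators.append((accelstart, accelerator))
--   return accelerators
-- ===== SOURCE B (Python) =====
-- def isvalidaccelerator(accelerator, ignorelist=[]):
--   """returns whether the given accelerator string is a valid one..."""
--   if len(accelerator) == 0 or accelerator in ignorelist:
--     return 0
--   accelerator = accelerator.replace("_","")
--   return accelerator.isalnum()
--
-- def findaccelerators(str1, accelmarker, ignorelist=[]):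
--   """returns all the accelerators and locations in str1 marked with a given marker"""
--   m = len(accelmarker)
--   # pass 1: every position followed by the marker AND at least one more character
--   occurrences = [i for i in range(len(str1) - m) if str1.startswith(accelmarker, i)]
--   # pass 2: greedily keep non-overlapping occurrences (marker + one char consumed)
--   accelerators = []
--   nextallowed = 0
--   for i in occurrences:
--     if i >= nextallowed:
--       accelerator = str1[i + m]
--       if isvalidaccelerator(accelerator, ignorelist):
--         accelerators.append((i, accelerator))
--       nextallowed = i + m + 1
--   return accelerators
-- ===== Notes on version B (the rewrite author's own statement) =====
-- stated objective: alternative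
-- what changed: Replaces A's single find/advance while-loop by two passes: a comprehension collecting every position where the marker (with a character after it) occurs, then a greedy fold that keeps non-overlapping occurrences and validates the following character.
import Mathlib
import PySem

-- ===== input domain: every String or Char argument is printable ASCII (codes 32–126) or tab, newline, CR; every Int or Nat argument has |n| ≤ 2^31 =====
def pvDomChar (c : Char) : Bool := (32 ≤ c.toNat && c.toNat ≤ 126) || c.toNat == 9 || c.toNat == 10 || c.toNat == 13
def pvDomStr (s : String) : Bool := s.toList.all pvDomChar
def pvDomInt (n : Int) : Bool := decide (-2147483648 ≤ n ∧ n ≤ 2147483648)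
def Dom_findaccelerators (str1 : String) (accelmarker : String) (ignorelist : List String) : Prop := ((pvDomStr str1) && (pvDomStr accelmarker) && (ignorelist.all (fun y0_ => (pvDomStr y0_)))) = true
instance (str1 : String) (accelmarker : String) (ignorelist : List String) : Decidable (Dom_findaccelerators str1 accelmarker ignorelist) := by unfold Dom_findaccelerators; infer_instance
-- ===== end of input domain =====

-- B replaces A's find/advance scanning loop by two passes — a comprehension of all
-- marker occurrences followed by a greedy non-overlap filter; alternative decomposition,
-- same cost, equivalence proved for the RETURN value (neither mutates its arguments).

-- shared helper: Python isvalidaccelerator (identical in Source A and Source B)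
def isvalidacceleratorPort (accelerator : List Char) (ignorelist : List (List Char)) : Bool :=
  if accelerator.length = 0 ∨ ignorelist.contains accelerator then false
  else PySem.Chars.strIsalnum (PySem.Chars.replace accelerator ['_'] [])

-- ===== PORT A =====
-- needed by the port's decreasing_by: a start past the length finds nothing
theorem pvFindFrom_past_len (s sub : List Char) (k : Nat) (h : s.length < k) :
    PySem.Chars.findFrom s sub (k : Int) none = -1 := by
  unfold PySem.Chars.findFrom
  simp only []
  split_ifs with h1 h2 h3 h4 <;> first | rfl | omega

-- the while loop of A, one recursive step per iteration
def findaccelGo (s marker : List Char) (ign : List (List Char)) (currentpos : Nat) :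
    List (Int × String) :=
  let f := PySem.Chars.findFrom s marker (currentpos : Int) none
  if _hf : f < 0 then []
  else
    let accelstart := f.toNat
    let newpos := accelstart + marker.length
    let accelend := newpos + 1
    if _hend : s.length < accelend then []
    else
      let accel := PySem.Chars.slice s (some (newpos : Int)) (some (accelend : Int))
      (if isvalidacceleratorPort accel ign then [((accelstart : Int), String.mk accel)] else [])
        ++ findaccelGo s marker ign accelend
termination_by s.length + 1 - currentpos
decreasing_by
  have hk : currentpos ≤ s.length := by
    by_contra hgt
    have := pvFindFrom_past_len s marker currentpos (by omega)
    omega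
  have hspec := PySem.Chars.findFrom_natCast_spec s marker currentpos hk (by omega)
  omega

def findaccelerators (str1 : String) (accelmarker : String) (ignorelist : List String) : List (Int × String) :=
  findaccelGo str1.toList accelmarker.toList (ignorelist.map String.toList) 0

-- ===== PORT B =====
-- one step of B's greedy pass: state = (accelerators so far, next allowed start)
def pvStepB (s : List Char) (m : Nat) (ign : List (List Char))
    (acc : List (Int × String) × Int) (i : Int) : List (Int × String) × Int :=
  if acc.2 ≤ i then
    match PySem.List.pyGet? s (i + (m : Int)) with   -- str1[i+m]; some: i + m < len by construction
    | some c =>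
        ((if isvalidacceleratorPort [c] ign then acc.1 ++ [(i, String.mk [c])] else acc.1),
         i + (m : Int) + 1)
    | none => (acc.1, i + (m : Int) + 1)             -- unreachable for i drawn from the range below
  else acc

def findaccelerators_alt (str1 : String) (accelmarker : String) (ignorelist : List String) : List (Int × String) :=
  let s := str1.toList
  let marker := accelmarker.toList
  let ign := ignorelist.map String.toList
  let m := marker.length
  -- pass 1: [i for i in range(len(str1) - m) if str1.startswith(accelmarker, i)]
  let occurrences := (PySem.List.pyRange 0 ((s.length : Int) - (m : Int)) 1).filter
      (fun i => PySem.Chars.startswith (List.drop i.toNat s) marker)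
  -- pass 2: greedy non-overlap fold
  (occurrences.foldl (pvStepB s m ign) ([], 0)).1

-- ===== PRECONDITION & SPEC =====
def Spec_findaccelerators (str1 : String) (accelmarker : String) (ignorelist : List String) (out : List (Int × String)) : Prop := out = findaccelerators_alt str1 accelmarker ignorelist
instance (str1 : String) (accelmarker : String) (ignorelist : List String) (out : List (Int × String)) : Decidable (Spec_findaccelerators str1 accelmarker ignorelist out) := by unfold Spec_findaccelerators; infer_instance

-- ===== CLAIM (what is proved, stated in full; the proofs are below) =====
def Claim_equal_findaccelerators : Prop := ∀ (str1 : String) (accelmarker : String) (ignorelist : List String), Dom_findaccelerators str1 accelmarker ignorelist → Spec_findaccelerators str1 accelmarker ignorelist (findaccelerators str1 accelmarker ignorelist)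

-- ===== LEMMAS AND PROOFS =====

-- needed by the port's decreasing_by: findFrom never returns below -1
theorem pvFindFrom_ge_neg_one (s sub : List Char) (k : Nat) :
    -1 ≤ PySem.Chars.findFrom s sub (k : Int) none := by
  unfold PySem.Chars.findFrom
  simp only []
  split_ifs with h1 h2 h3 h4 <;>
    first
    | omega
    | (have := PySem.Chars.neg_one_le_find (List.drop (Int.toNat (k : Int)) (List.take (Int.toNat (s.length : Int)) s)) sub
       omega)

-- B's first pass, as the proofs refer to it
def pvOcc (s marker : List Char) : List Int :=
  (PySem.List.pyRange 0 ((s.length : Int) - (marker.length : Int)) 1).filter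
    (fun i => PySem.Chars.startswith (List.drop i.toNat s) marker)

theorem pvOcc_mem {s marker : List Char} {x : Int} (hx : x ∈ pvOcc s marker) :
    0 ≤ x ∧ x + marker.length < s.length ∧ marker <+: List.drop x.toNat s := by
  unfold pvOcc at hx
  rcases List.mem_filter.mp hx with ⟨hr, hp⟩
  rcases PySem.List.mem_pyRange_one.mp hr with ⟨h0, hlt⟩
  exact ⟨h0, by omega, (PySem.Chars.startswith_iff _ _).mp hp⟩

theorem pvOcc_sorted (s marker : List Char) : (pvOcc s marker).Pairwise (· < ·) := by
  unfold pvOcc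
  apply List.Pairwise.filter
  rw [PySem.List.pyRange_of_pos 0 _ (by norm_num : (0:Int) < 1)]
  rw [List.pairwise_map]
  have := List.pairwise_lt_range (n := (if (0:Int) < (s.length : Int) - (marker.length : Int) then ((((s.length : Int) - (marker.length : Int)) - 0 + 1 - 1) / 1).toNat else 0))
  exact this.imp (by intro a b h; omega)

-- the fold's result list factors through its accumulator
theorem pvStepB_factor (s : List Char) (m : Nat) (ign : List (List Char))
    (r : List (Int × String)) (na : Int) (i : Int) :
    pvStepB s m ign (r, na) i
      = (r ++ (pvStepB s m ign ([], na) i).1, (pvStepB s m ign ([], na) i).2) := by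
  unfold pvStepB
  by_cases h : na ≤ i <;> simp [h]
  cases PySem.List.pyGet? s (i + (m : Int)) with
  | none => simp
  | some c => by_cases hv : isvalidacceleratorPort [c] ign <;> simp [hv]

theorem pvFold_factor (s : List Char) (m : Nat) (ign : List (List Char)) :
    ∀ (l : List Int) (r : List (Int × String)) (na : Int),
      (l.foldl (pvStepB s m ign) (r, na)).1 = r ++ (l.foldl (pvStepB s m ign) ([], na)).1 := by
  intro l
  induction l with
  | nil => intro r na; simp
  | cons x t ih =>
      intro r na
      simp only [List.foldl_cons]
      rw [pvStepB_factor]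
      rw [ih _ (pvStepB s m ign ([], na) x).2, ih (pvStepB s m ign ([], na) x).1]
      simp

theorem pvFold_skip (s : List Char) (m : Nat) (ign : List (List Char)) :
    ∀ (l : List Int) (r : List (Int × String)) (na : Int),
      (∀ x ∈ l, x < na) → l.foldl (pvStepB s m ign) (r, na) = (r, na) := by
  intro l
  induction l with
  | nil => intro r na _; rfl
  | cons x t ih =>
      intro r na h
      have hx : x < na := h x List.mem_cons_self
      simp only [List.foldl_cons]
      have : pvStepB s m ign (r, na) x = (r, na) := by
        unfold pvStepB; simp [show ¬ na ≤ x by omega]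
      rw [this]
      exact ih r na (fun y hy => h y (List.mem_cons_of_mem _ hy))

theorem pvTake_one_drop (l : List Char) (k : Nat) (h : k < l.length) :
    List.take 1 (List.drop k l) = [l[k]] := by
  rw [List.drop_eq_getElem_cons h]
  rfl

-- main invariant: continuing A's loop at currentpos = the greedy fold started at that position
theorem pvMain (s marker : List Char) (ign : List (List Char)) :
    ∀ (fuel pos : Nat), s.length + 1 - pos ≤ fuel →
      findaccelGo s marker ign pos
        = ((pvOcc s marker).foldl (pvStepB s marker.length ign) ([], (pos : Int))).1 := by
  intro fuel
  induction fuel with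
  | zero =>
      intro pos hfuel
      rw [findaccelGo]
      have hpos : s.length < pos := by omega
      rw [dif_pos (by rw [pvFindFrom_past_len s marker pos hpos]; norm_num)]
      rw [pvFold_skip s marker.length ign _ _ _ (by
        intro x hx
        have := (pvOcc_mem hx).2.1
        omega)]
  | succ fuel ih =>
      intro pos hfuel
      rw [findaccelGo]
      by_cases hf : PySem.Chars.findFrom s marker (pos : Int) none < 0
      · -- find failed: no occurrence at or after pos, so the fold skips everything
        rw [dif_pos hf]
        rw [pvFold_skip s marker.length ign _ _ _ ?_]
        intro x hx
        rcases pvOcc_mem hx with ⟨hx0, hxlt, hxpre⟩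
        by_contra hge
        have hxpos : (pos : Int) ≤ x := by omega
        have hk : pos ≤ s.length := by
          by_contra hgt
          have := (pvOcc_mem hx).2.1; omega
        have hfm1 : PySem.Chars.findFrom s marker (pos : Int) none = -1 := by
          have := pvFindFrom_ge_neg_one s marker pos; omega
        have hninf := (PySem.Chars.findFrom_natCast_eq_neg_one_iff s marker pos hk).mp hfm1
        apply hninf
        rw [← PySem.Chars.isIn_iff_infix, ← PySem.Chars.exists_prefix_drop_iff_isIn]
        refine ⟨x.toNat - pos, ?_⟩
        rw [List.drop_drop, show pos + (x.toNat - pos) = x.toNat by omega]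
        exact hxpre
      · rw [dif_neg hf]
        have hk : pos ≤ s.length := by
          by_contra hgt
          have := pvFindFrom_past_len s marker pos (by omega)
          omega
        have hspec := PySem.Chars.findFrom_natCast_spec s marker pos hk (by omega)
        set f := PySem.Chars.findFrom s marker (pos : Int) none with hfdef
        obtain ⟨hge, hpre, hmin⟩ := hspec
        have hptn : ((f.toNat : Int)) = f := by omega
        by_cases hend : s.length < f.toNat + marker.length + 1
        · -- break case: the only occurrence at/after pos (if any) has no char after it
          rw [dif_pos hend]
          rw [pvFold_skip s marker.length ign _ _ _ ?_]
          intro x hx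
          rcases pvOcc_mem hx with ⟨hx0, hxlt, hxpre⟩
          by_contra hge'
          have hxp : x.toNat < f.toNat := by omega
          exact hmin x.toNat (by omega) hxp (by simpa using hxpre)
        · rw [dif_neg hend]
          -- f.toNat is an element of B's occurrence list; split the list there
          have hfm : (f.toNat : Int) ∈ pvOcc s marker := by
            unfold pvOcc
            refine List.mem_filter.mpr ⟨PySem.List.mem_pyRange_one.mpr ⟨by omega, by omega⟩, ?_⟩
            rw [PySem.Chars.startswith_iff, Int.toNat_natCast]
            exact hpre
          obtain ⟨l₁, l₂, hsplit⟩ := List.append_of_mem hfm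
          have hsorted := pvOcc_sorted s marker
          rw [hsplit] at hsorted
          rcases List.pairwise_append.mp hsorted with ⟨_, hsl₂, hcross⟩
          have hl₂gt : ∀ y ∈ l₂, (f.toNat : Int) < y := (List.pairwise_cons.mp hsl₂).1
          have hl₁lt : ∀ x ∈ l₁, x < (pos : Int) := by
            intro x hx
            have hxo : x ∈ pvOcc s marker := by rw [hsplit]; exact List.mem_append_left _ hx
            rcases pvOcc_mem hxo with ⟨hx0, hxlt, hxpre⟩
            have hxf : x < (f.toNat : Int) := hcross x hx _ List.mem_cons_self
            by_contra hge'
            exact hmin x.toNat (by omega) (by omega) (by simpa using hxpre)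
          -- evaluate the fold along l₁ ++ f.toNat :: l₂ starting at pos
          have hchar : PySem.List.pyGet? s ((f.toNat : Int) + (marker.length : Int))
              = some (s[f.toNat + marker.length]'(by omega)) := by
            rw [show (f.toNat : Int) + (marker.length : Int) = ((f.toNat + marker.length : Nat) : Int) by push_cast; ring]
            rw [PySem.List.pyGet?_natCast]
            exact List.getElem?_eq_getElem (by omega)
          have haccel : PySem.Chars.slice s (some ((f.toNat + marker.length : Nat) : Int))
              (some ((f.toNat + marker.length + 1 : Nat) : Int)) = [s[f.toNat + marker.length]'(by omega)] := by
            rw [PySem.Chars.slice_eq_listSlice, PySem.List.slice_natCast]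
            rw [show f.toNat + marker.length + 1 - (f.toNat + marker.length) = 1 by omega]
            exact pvTake_one_drop s _ (by omega)
          have hbstep : pvStepB s marker.length ign ([], (pos : Int)) ((f.toNat : Int))
              = ((if isvalidacceleratorPort [s[f.toNat + marker.length]'(by omega)] ign
                  then [((f.toNat : Int), String.mk [s[f.toNat + marker.length]'(by omega)])] else []),
                 ((f.toNat + marker.length + 1 : Nat) : Int)) := by
            unfold pvStepB
            rw [if_pos (by omega : (pos : Int) ≤ (f.toNat : Int))]
            rw [hchar]
            by_cases hv : isvalidacceleratorPort [s[f.toNat + marker.length]'(by omega)] ign <;>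
              simp [hv]
          rw [hsplit, List.foldl_append,
            pvFold_skip s marker.length ign l₁ _ _ hl₁lt, List.foldl_cons, hbstep,
            pvFold_factor]
          -- the recursive call, via the induction hypothesis
          rw [ih (f.toNat + marker.length + 1) (by omega)]
          -- fold over the full list from the new position skips l₁ and f.toNat
          rw [hsplit, List.foldl_append,
            pvFold_skip s marker.length ign l₁ _ _ (by intro x hx; have := hl₁lt x hx; omega),
            List.foldl_cons,
            show pvStepB s marker.length ign ([], ((f.toNat + marker.length + 1 : Nat) : Int)) ((f.toNat : Int))
              = ([], ((f.toNat + marker.length + 1 : Nat) : Int)) by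
                unfold pvStepB; rw [if_neg (by push_cast; omega)]]
          have hmax : max f 0 = f := by omega
          simp only [Int.ofNat_toNat, hmax] at haccel hbstep ⊢
          push_cast at haccel hbstep ⊢
          rw [haccel]

-- ===== VERDICT (by name: the statement is the Claim_ definition above) =====
theorem findaccelerators_spec : Claim_equal_findaccelerators := by
  intro str1 accelmarker ignorelist _
  unfold Spec_findaccelerators findaccelerators findaccelerators_alt
  exact pvMain str1.toList accelmarker.toList (ignorelist.map String.toList)
    (str1.toList.length + 1) 0 (by omega)
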